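-- pv_equiv track=rewrite | github.com/Midhilesh4890/Leetcode-Problems | Google/combinationsum.py | can_sum_to_max_meet_middle
-- ===== SOURCE A (Python) =====
-- from itertools import combinations
--
-- def get_all_sums(arr):
--     sums = set()
--     n = len(arr)
--     for i in range(n + 1):
--         for subset in combinations(arr, i):
--             sums.add(sum(subset))
--     return sums
--
-- def can_sum_to_max_meet_middle(arr):
--     if len(arr) < 2:
--         return False
--
--     max_element = max(arr)
--     arr.remove(max_element)
--
--     mid = len(arr) // 2
--     left_part = arr[:mid]
--     right_part = arr[mid:]
--
--     left_sums = get_all_sums(left_part)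
--     right_sums = get_all_sums(right_part)
--
--     # Check if any sum from left + sum from right equals max_element
--     for s in left_sums:
--         if (max_element - s) in right_sums:
--             return True
--
--     return False
-- ===== SOURCE B (Python) =====
-- def _subset_sums(part):
--     sums = {0}
--     for x in part:
--         sums |= {s + x for s in sums}
--     return sums
--
--
-- def can_sum_to_max_meet_middle(arr):
--     if len(arr) < 2:
--         return False
--     target = max(arr)
--     arr.remove(target)
--     mid = len(arr) // 2
--     left = _subset_sums(arr[:mid])
--     right = _subset_sums(arr[mid:])
--     return bool({target - s for s in left} & right)
-- ===== Notes on version B (the rewrite author's own statement) =====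
-- stated objective: alternative
-- what changed: Each half's subset sums are built incrementally (extend the running sum-set one element at a time) instead of enumerating every combination of every size and re-summing it, and the final meet step is a set intersection instead of a scan with lookups.
import Mathlib
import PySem

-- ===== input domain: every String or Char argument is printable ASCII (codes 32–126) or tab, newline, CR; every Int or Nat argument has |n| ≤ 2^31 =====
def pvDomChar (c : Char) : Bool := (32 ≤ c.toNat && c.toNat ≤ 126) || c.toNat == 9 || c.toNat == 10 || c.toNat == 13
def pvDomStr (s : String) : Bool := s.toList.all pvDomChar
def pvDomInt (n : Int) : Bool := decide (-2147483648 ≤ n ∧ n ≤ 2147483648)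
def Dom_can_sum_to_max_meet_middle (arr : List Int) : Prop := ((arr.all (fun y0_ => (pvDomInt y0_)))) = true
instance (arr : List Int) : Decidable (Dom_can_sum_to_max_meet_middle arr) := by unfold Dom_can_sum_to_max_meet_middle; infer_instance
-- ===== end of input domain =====

-- ===== PORT A =====
-- B replaces the per-size combinations enumeration with an incremental subset-sum set
-- and the final scan with a set intersection (objective: alternative).  Both A and B remove
-- the max element from the caller's list in place; the theorems are about the return value.

-- itertools.combinations(l, i), in enumeration order
def pyCombinations : List Int → Nat → List (List Int)
  | _, 0 => [[]]
  | [], _ + 1 => []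
  | x :: xs, i + 1 => (pyCombinations xs i).map (x :: ·) ++ pyCombinations xs (i + 1)

def get_all_sums (arr : List Int) : PySem.Set Int :=
  (List.range (arr.length + 1)).foldl
    (fun sums i => (pyCombinations arr i).foldl (fun s t => PySem.Set.add s t.sum) sums)
    PySem.Set.empty

def can_sum_to_max_meet_middle (arr : List Int) : Bool :=
  if arr.length < 2 then false
  else
    match PySem.List.max? arr (fun y => y) with
    | none => false  -- unreachable: arr ≠ []
    | some max_element =>
      match PySem.List.remove? arr max_element with
      | none => false  -- unreachable: max_element ∈ arr
      | some arr' =>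
        let mid := PySem.Int.floordiv (arr'.length : Int) 2
        let left_part := PySem.List.slice arr' none (some mid)
        let right_part := PySem.List.slice arr' (some mid) none
        let left_sums := get_all_sums left_part
        let right_sums := get_all_sums right_part
        left_sums.any (fun s => PySem.Set.contains right_sums (max_element - s))

-- ===== PORT B =====
def subsetSumsB (part : List Int) : PySem.Set Int :=
  part.foldl (fun sums x => PySem.Set.union sums (sums.map (fun s => s + x)))
    (PySem.Set.ofList [(0 : Int)])

def can_sum_to_max_meet_middle_alt (arr : List Int) : Bool :=
  if arr.length < 2 then false
  else
    match PySem.List.max? arr (fun y => y) with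
    | none => false  -- unreachable: arr ≠ []
    | some target =>
      match PySem.List.remove? arr target with
      | none => false  -- unreachable: target ∈ arr
      | some arr' =>
        let mid := PySem.Int.floordiv (arr'.length : Int) 2
        let left := subsetSumsB (PySem.List.slice arr' none (some mid))
        let right := subsetSumsB (PySem.List.slice arr' (some mid) none)
        !(PySem.Set.inter (PySem.Set.ofList (left.map (fun s => target - s))) right).isEmpty

-- ===== PRECONDITION & SPEC =====
def Spec_can_sum_to_max_meet_middle (arr : List Int) (out : Bool) : Prop := out = can_sum_to_max_meet_middle_alt arr
instance (arr : List Int) (out : Bool) : Decidable (Spec_can_sum_to_max_meet_middle arr out) := by unfold Spec_can_sum_to_max_meet_middle; infer_instance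

-- ===== CLAIM (what is proved, stated in full; the proofs are below) =====
def Claim_equal_can_sum_to_max_meet_middle : Prop := ∀ (arr : List Int), Dom_can_sum_to_max_meet_middle arr → Spec_can_sum_to_max_meet_middle arr (can_sum_to_max_meet_middle arr)

-- ===== LEMMAS AND PROOFS =====

-- "s is the sum of some sub(multi)set of l"
def IsSubsetSum (l : List Int) (s : Int) : Prop := ∃ t : List Int, t.Sublist l ∧ t.sum = s

theorem mem_pyCombinations (l : List Int) : ∀ (i : Nat) (t : List Int),
    t ∈ pyCombinations l i ↔ t.Sublist l ∧ t.length = i := by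
  induction l with
  | nil =>
    intro i t
    cases i with
    | zero => simp [pyCombinations, List.sublist_nil]
    | succ j =>
      simp only [pyCombinations, List.not_mem_nil, false_iff]
      rintro ⟨hs, hl⟩
      simp [List.sublist_nil] at hs
      simp [hs] at hl
  | cons x xs ih =>
    intro i t
    cases i with
    | zero =>
      simp only [pyCombinations, List.mem_singleton]
      constructor
      · rintro rfl; exact ⟨List.nil_sublist _, rfl⟩
      · rintro ⟨_, hl⟩; exact List.length_eq_zero_iff.mp hl
    | succ j =>
      simp only [pyCombinations, List.mem_append, List.mem_map, ih,
        List.sublist_cons_iff]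
      constructor
      · rintro (⟨r, ⟨hr, hlen⟩, rfl⟩ | ⟨hs, hl⟩)
        · exact ⟨Or.inr ⟨r, rfl, hr⟩, by simp [hlen]⟩
        · exact ⟨Or.inl hs, hl⟩
      · rintro ⟨hs | ⟨r, rfl, hr⟩, hl⟩
        · exact Or.inr ⟨hs, hl⟩
        · exact Or.inl ⟨r, ⟨hr, by simpa using hl⟩, rfl⟩

theorem mem_foldl_add_sums (ts : List (List Int)) (s0 : PySem.Set Int) (x : Int) :
    x ∈ ts.foldl (fun s t => PySem.Set.add s t.sum) s0 ↔ x ∈ s0 ∨ ∃ t ∈ ts, t.sum = x := by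
  induction ts generalizing s0 with
  | nil => simp
  | cons t ts ih =>
    simp only [List.foldl_cons, ih, PySem.Set.mem_add, List.mem_cons]
    constructor
    · rintro ((h | rfl) | ⟨u, hu, rfl⟩)
      · exact Or.inl h
      · exact Or.inr ⟨t, Or.inl rfl, rfl⟩
      · exact Or.inr ⟨u, Or.inr hu, rfl⟩
    · rintro (h | ⟨u, (rfl | hu), rfl⟩)
      · exact Or.inl (Or.inl h)
      · exact Or.inl (Or.inr rfl)
      · exact Or.inr ⟨u, hu, rfl⟩

theorem mem_get_all_sums (l : List Int) (x : Int) :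
    x ∈ get_all_sums l ↔ IsSubsetSum l x := by
  unfold get_all_sums
  have key : ∀ (is : List Nat) (s0 : PySem.Set Int),
      x ∈ is.foldl (fun sums i => (pyCombinations l i).foldl (fun s t => PySem.Set.add s t.sum) sums) s0
        ↔ x ∈ s0 ∨ ∃ i ∈ is, ∃ t ∈ pyCombinations l i, t.sum = x := by
    intro is
    induction is with
    | nil => simp
    | cons i is ih =>
      intro s0
      simp only [List.foldl_cons, ih, mem_foldl_add_sums, List.mem_cons]
      constructor
      · rintro ((h | h) | h)
        · exact Or.inl h
        · exact Or.inr ⟨i, Or.inl rfl, h⟩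
        · obtain ⟨j, hj, ht⟩ := h; exact Or.inr ⟨j, Or.inr hj, ht⟩
      · rintro (h | ⟨j, (rfl | hj), ht⟩)
        · exact Or.inl (Or.inl h)
        · exact Or.inl (Or.inr ht)
        · exact Or.inr ⟨j, hj, ht⟩
  rw [key]
  simp only [PySem.Set.empty, List.not_mem_nil, false_or, List.mem_range]
  constructor
  · rintro ⟨i, _, t, ht, hs⟩
    exact ⟨t, (mem_pyCombinations l i t).mp ht |>.1, hs⟩
  · rintro ⟨t, hsub, hs⟩
    exact ⟨t.length, by have := hsub.length_le; omega,
      t, (mem_pyCombinations l t.length t).mpr ⟨hsub, rfl⟩, hs⟩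

theorem mem_subsetSumsB (l : List Int) (x : Int) :
    x ∈ subsetSumsB l ↔ IsSubsetSum l x := by
  unfold subsetSumsB
  have key : ∀ (l : List Int) (s0 : PySem.Set Int),
      x ∈ l.foldl (fun sums x => PySem.Set.union sums (sums.map (fun s => s + x))) s0
        ↔ ∃ y ∈ s0, ∃ t : List Int, t.Sublist l ∧ y + t.sum = x := by
    intro l
    induction l with
    | nil =>
      intro s0
      simp only [List.foldl_nil, List.sublist_nil]
      constructor
      · intro h; exact ⟨x, h, [], rfl, by simp⟩
      · rintro ⟨y, hy, t, rfl, hs⟩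
        have hyx : y = x := by simpa using hs
        exact hyx ▸ hy
    | cons a l ih =>
      intro s0
      simp only [List.foldl_cons, ih, PySem.Set.mem_union, List.mem_map]
      constructor
      · rintro ⟨y, hy | ⟨z, hz, rfl⟩, t, ht, hsum⟩
        · exact ⟨y, hy, t, ht.cons a, hsum⟩
        · exact ⟨z, hz, a :: t, (List.sublist_cons_iff).mpr (Or.inr ⟨t, rfl, ht⟩),
            by simp only [List.sum_cons]; omega⟩
      · rintro ⟨y, hy, t, ht, hsum⟩
        rcases (List.sublist_cons_iff).mp ht with h | ⟨r, rfl, hr⟩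
        · exact ⟨y, Or.inl hy, t, h, hsum⟩
        · exact ⟨y + a, Or.inr ⟨y, hy, rfl⟩, r, hr,
            by simp only [List.sum_cons] at hsum; omega⟩
  rw [key]
  constructor
  · rintro ⟨y, hy, t, ht, hsum⟩
    simp only [PySem.Set.mem_ofList, List.mem_singleton] at hy
    exact ⟨t, ht, by omega⟩
  · rintro ⟨t, ht, hs⟩
    exact ⟨0, by simp [PySem.Set.mem_ofList], t, ht, by omega⟩

theorem meet_eq (m : Int) (L R : List Int) :
    (!(PySem.Set.inter (PySem.Set.ofList ((subsetSumsB L).map (fun s => m - s))) (subsetSumsB R)).isEmpty)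
      = (get_all_sums L).any (fun s => PySem.Set.contains (get_all_sums R) (m - s)) := by
  rw [Bool.eq_iff_iff]
  simp only [Bool.not_eq_true', List.isEmpty_eq_false_iff_exists_mem, List.any_eq_true]
  constructor
  · rintro ⟨y, hy⟩
    rw [PySem.Set.mem_inter] at hy
    obtain ⟨h1, h2⟩ := hy
    rw [PySem.Set.mem_ofList, List.mem_map] at h1
    obtain ⟨s, hs, rfl⟩ := h1
    refine ⟨s, (mem_get_all_sums L s).mpr ((mem_subsetSumsB L s).mp hs), ?_⟩
    rw [PySem.Set.contains_iff, mem_get_all_sums]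
    exact (mem_subsetSumsB R _).mp h2
  · rintro ⟨s, hs, hc⟩
    refine ⟨m - s, ?_⟩
    rw [PySem.Set.mem_inter]
    refine ⟨?_, (mem_subsetSumsB R _).mpr ?_⟩
    · rw [PySem.Set.mem_ofList, List.mem_map]
      exact ⟨s, (mem_subsetSumsB L s).mpr ((mem_get_all_sums L s).mp hs), rfl⟩
    · rw [PySem.Set.contains_iff, mem_get_all_sums] at hc
      exact hc

-- ===== VERDICT (by name: the statement is the Claim_ definition above) =====
theorem can_sum_to_max_meet_middle_spec : Claim_equal_can_sum_to_max_meet_middle := by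
  intro arr _
  unfold Spec_can_sum_to_max_meet_middle can_sum_to_max_meet_middle can_sum_to_max_meet_middle_alt
  split
  · rfl
  · rcases PySem.List.max? arr (fun y => y) with _ | m
    · rfl
    · cases h : PySem.List.remove? arr m with
      | none => simp only [h]
      | some arr' => simp only [h]; exact (meet_eq m _ _).symm
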